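-- pv_equiv track=rewrite | github.com/JoeyGE0/ha_powershop_nz | custom_components/powershop_nz/parsers.py | _guess_columns
-- ===== SOURCE A (Python) =====
-- from typing import Any, Dict, List, Optional, Tuple
--
-- def _guess_columns(headers: List[str]) -> Tuple[Optional[str], Optional[str], Optional[str]]:
--     lowered = [h.strip().lower() for h in headers]
--     date_col = None
--     kwh_col = None
--     cost_col = None
--
--     for h, lh in zip(headers, lowered):
--         if lh in ("date", "day", "period", "start") or "date" in lh:
--             date_col = h
--             break
--     # If no explicit date, accept end as fallback
--     if date_col is None:
--         for h, lh in zip(headers, lowered):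
--             if lh == "end":
--                 date_col = h
--                 break
--
--     for h, lh in zip(headers, lowered):
--         if "kwh" in lh or lh in ("usage", "energy", "consumption"):
--             kwh_col = h
--             break
--     # Powershop CSV can use "Average daily use" without 'kWh' in the header
--     if kwh_col is None:
--         for h, lh in zip(headers, lowered):
--             if "use" in lh and "estimate" not in lh and "cost" not in lh:
--                 kwh_col = h
--                 break
--
--     for h, lh in zip(headers, lowered):
--         if "cost" in lh or "price" in lh or "$" in lh or "nzd" in lh:
--             cost_col = h
--             break
--     # Some exports label cost column as "Estimate"
--     if cost_col is None:
--         for h, lh in zip(headers, lowered):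
--             if lh == "estimate":
--                 cost_col = h
--                 break
--
--     if headers and date_col is None:
--         date_col = headers[0]
--
--     return date_col, kwh_col, cost_col
-- ===== SOURCE B (Python) =====
-- from typing import List, Optional, Tuple
--
-- def _guess_columns(headers: List[str]) -> Tuple[Optional[str], Optional[str], Optional[str]]:
--     date_primary = date_end = None
--     kwh_primary = kwh_use = None
--     cost_primary = cost_estimate = None
--     for h in headers:
--         lh = h.strip().lower()
--         if date_primary is None and (lh in ("date", "day", "period", "start") or "date" in lh):
--             date_primary = h
--         if date_end is None and lh == "end":
--             date_end = h
--         if kwh_primary is None and ("kwh" in lh or lh in ("usage", "energy", "consumption")):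
--             kwh_primary = h
--         if kwh_use is None and ("use" in lh and "estimate" not in lh and "cost" not in lh):
--             kwh_use = h
--         if cost_primary is None and ("cost" in lh or "price" in lh or "$" in lh or "nzd" in lh):
--             cost_primary = h
--         if cost_estimate is None and lh == "estimate":
--             cost_estimate = h
--     date_col = date_primary if date_primary is not None else date_end
--     kwh_col = kwh_primary if kwh_primary is not None else kwh_use
--     cost_col = cost_primary if cost_primary is not None else cost_estimate
--     if headers and date_col is None:
--         date_col = headers[0]
--     return date_col, kwh_col, cost_col
-- ===== Notes on version B (the rewrite author's own statement) =====
-- stated objective: alternative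
-- what changed: Replaced A's six sequential first-match scans over zip(headers, lowered) by one pass over headers maintaining six first-seen candidate variables, with primary-over-fallback resolution and the headers[0] default applied after the loop.
import Mathlib
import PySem

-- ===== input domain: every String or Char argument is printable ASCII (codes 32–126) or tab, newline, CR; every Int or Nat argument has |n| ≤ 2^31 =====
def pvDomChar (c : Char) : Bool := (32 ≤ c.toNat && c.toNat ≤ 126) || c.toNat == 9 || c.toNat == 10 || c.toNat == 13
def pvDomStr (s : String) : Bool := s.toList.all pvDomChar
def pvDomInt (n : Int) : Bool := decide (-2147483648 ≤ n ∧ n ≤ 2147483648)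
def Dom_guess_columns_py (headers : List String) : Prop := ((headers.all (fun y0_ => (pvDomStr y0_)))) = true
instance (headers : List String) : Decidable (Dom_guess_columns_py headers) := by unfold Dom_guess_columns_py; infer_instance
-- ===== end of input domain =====

-- B replaces A's six sequential first-match scans by ONE pass maintaining six first-seen
-- candidates, resolved primary-over-fallback after the loop (objective: alternative decomposition).

-- shared predicates (the literal conditions of the Python tests, on the lowered header)
def pvLow (h : String) : String := PySem.Str.lower (PySem.Str.strip h)
def pvPDate (lh : String) : Bool :=
  (lh == "date" || lh == "day" || lh == "period" || lh == "start") || PySem.Str.isIn "date" lh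
def pvPEnd (lh : String) : Bool := lh == "end"
def pvPKwh (lh : String) : Bool :=
  PySem.Str.isIn "kwh" lh || (lh == "usage" || lh == "energy" || lh == "consumption")
def pvPUse (lh : String) : Bool :=
  PySem.Str.isIn "use" lh && !PySem.Str.isIn "estimate" lh && !PySem.Str.isIn "cost" lh
def pvPCost (lh : String) : Bool :=
  PySem.Str.isIn "cost" lh || PySem.Str.isIn "price" lh || PySem.Str.isIn "$" lh || PySem.Str.isIn "nzd" lh
def pvPEst (lh : String) : Bool := lh == "estimate"

-- ===== PORT A =====
-- 'for h, lh in zip(headers, lowered): if p(lh): col = h; break'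
def pvScan (p : String → Bool) : List (String × String) → Option String
  | [] => none
  | (h, lh) :: rest => if p lh then some h else pvScan p rest

def guess_columns_py (headers : List String) : Option String × Option String × Option String :=
  let lowered := headers.map pvLow
  let pairs := headers.zip lowered
  let date_col := pvScan pvPDate pairs
  let date_col := if date_col.isNone then pvScan pvPEnd pairs else date_col
  let kwh_col := pvScan pvPKwh pairs
  let kwh_col := if kwh_col.isNone then pvScan pvPUse pairs else kwh_col
  let cost_col := pvScan pvPCost pairs
  let cost_col := if cost_col.isNone then pvScan pvPEst pairs else cost_col
  let date_col := match headers, date_col with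
    | h0 :: _, none => some h0
    | _, dc => dc
  (date_col, kwh_col, cost_col)

-- ===== PORT B =====
-- six first-seen candidates maintained in one fold over headers
def pvSet1 (c : Option String) (p : String → Bool) (h lh : String) : Option String :=
  if c.isNone && p lh then some h else c

def pvState := Option String × Option String × Option String × Option String × Option String × Option String

def pvStep (s : pvState) (h : String) : pvState :=
  let lh := pvLow h
  (pvSet1 s.1 pvPDate h lh, pvSet1 s.2.1 pvPEnd h lh, pvSet1 s.2.2.1 pvPKwh h lh,
   pvSet1 s.2.2.2.1 pvPUse h lh, pvSet1 s.2.2.2.2.1 pvPCost h lh, pvSet1 s.2.2.2.2.2 pvPEst h lh)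

-- 'x if x is not None else y'
def pvOr (a b : Option String) : Option String := match a with | some x => some x | none => b

def guess_columns_py_alt (headers : List String) : Option String × Option String × Option String :=
  let st := headers.foldl pvStep (none, none, none, none, none, none)
  let date_col := pvOr st.1 st.2.1
  let kwh_col := pvOr st.2.2.1 st.2.2.2.1
  let cost_col := pvOr st.2.2.2.2.1 st.2.2.2.2.2
  let date_col := match headers with
    | [] => date_col
    | h0 :: _ => pvOr date_col (some h0)
  (date_col, kwh_col, cost_col)

-- ===== PRECONDITION & SPEC =====
def Spec_guess_columns_py (headers : List String) (out : Option String × Option String × Option String) : Prop := out = guess_columns_py_alt headers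
instance (headers : List String) (out : Option String × Option String × Option String) : Decidable (Spec_guess_columns_py headers out) := by unfold Spec_guess_columns_py; infer_instance

-- ===== CLAIM (what is proved, stated in full; the proofs are below) =====
def Claim_equal_guess_columns_py : Prop := ∀ (headers : List String), Dom_guess_columns_py headers → Spec_guess_columns_py headers (guess_columns_py headers)

-- ===== LEMMAS AND PROOFS =====
lemma pvOr_none_right (a : Option String) : pvOr a none = a := by cases a <;> rfl

lemma pvOr_none_left (b : Option String) : pvOr none b = b := rfl

-- 'if col is None: col = fallback' is exactly 'primary if not None else fallback'
lemma pvIf_isNone_eq_pvOr (a b : Option String) :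
    (if a.isNone then b else a) = pvOr a b := by cases a <;> rfl

-- the headers[0] default, written A's way and B's way
lemma pvDefault_eq (headers : List String) (a : Option String) :
    (match headers, a with | h0 :: _, none => some h0 | _, dc => dc) =
      (match headers with | [] => a | h0 :: _ => pvOr a (some h0)) := by
  cases headers <;> cases a <;> rfl

-- combining a first-seen candidate with the first match of the rest = first match of the whole list
lemma pvSet1_or (c : Option String) (p : String → Bool) (h : String) (rest : List String) :
    pvOr (pvSet1 c p h (pvLow h)) (pvScan p (rest.zip (rest.map pvLow))) =
      pvOr c (pvScan p ((h :: rest).zip ((h :: rest).map pvLow))) := by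
  cases c <;> simp [pvSet1, pvScan, pvOr] <;> split_ifs <;> simp [pvOr]

-- the one-pass fold computes, componentwise, 'initial candidate <|> first match'
lemma pvFold_eq (headers : List String) (s : pvState) :
    headers.foldl pvStep s =
      (pvOr s.1 (pvScan pvPDate (headers.zip (headers.map pvLow))),
       pvOr s.2.1 (pvScan pvPEnd (headers.zip (headers.map pvLow))),
       pvOr s.2.2.1 (pvScan pvPKwh (headers.zip (headers.map pvLow))),
       pvOr s.2.2.2.1 (pvScan pvPUse (headers.zip (headers.map pvLow))),
       pvOr s.2.2.2.2.1 (pvScan pvPCost (headers.zip (headers.map pvLow))),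
       pvOr s.2.2.2.2.2 (pvScan pvPEst (headers.zip (headers.map pvLow)))) := by
  induction headers generalizing s with
  | nil =>
    obtain ⟨a, b, c, d, e, f⟩ := s
    simp [pvScan, pvOr_none_right]
  | cons h rest ih =>
    rw [List.foldl_cons, ih]
    obtain ⟨a, b, c, d, e, f⟩ := s
    simp only [pvStep]
    rw [pvSet1_or, pvSet1_or, pvSet1_or, pvSet1_or, pvSet1_or, pvSet1_or]

-- ===== VERDICT (by name: the statement is the Claim_ definition above) =====
theorem guess_columns_py_spec : Claim_equal_guess_columns_py := by
  intro headers _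
  unfold Spec_guess_columns_py guess_columns_py guess_columns_py_alt
  rw [pvFold_eq]
  simp only [pvIf_isNone_eq_pvOr, pvOr_none_left, pvDefault_eq]
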